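-- pv_equiv track=rewrite | github.com/CrazyCows/belief_revision | src/functions/functions.py | check_correct_input
-- ===== SOURCE A (Python) =====
-- def check_correct_input(string):
--     """
--     Checks for if an input string is formatted correctly
--     """
--     allowed_characters = set("ABCDFGHJKLMPRTUVWXYZ~&|>() ")
--     alpha_count = 0
--     for char in string:
--         if char not in allowed_characters:
--             return False
--         if char.isalpha():
--             alpha_count += 1
--     if alpha_count == 0:
--         return False
--     return True
-- ===== SOURCE B (Python) =====
-- def check_correct_input(string):
--     """
--     Checks for if an input string is formatted correctly
--     """
--     letters = set("ABCDFGHJKLMPRTUVWXYZ")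
--     symbols = set("~&|>() ")
--     chars = set(string)
--     return chars.issubset(letters | symbols) and not chars.isdisjoint(letters)
-- ===== Notes on version B (the rewrite author's own statement) =====
-- stated objective: alternative
-- what changed: Replaces A's fused per-character loop (early return + alpha counter) with set algebra on the distinct characters: set(string) must be a subset of letters|symbols and must not be disjoint from the letters, eliminating any per-character isalpha test.
import Mathlib
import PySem

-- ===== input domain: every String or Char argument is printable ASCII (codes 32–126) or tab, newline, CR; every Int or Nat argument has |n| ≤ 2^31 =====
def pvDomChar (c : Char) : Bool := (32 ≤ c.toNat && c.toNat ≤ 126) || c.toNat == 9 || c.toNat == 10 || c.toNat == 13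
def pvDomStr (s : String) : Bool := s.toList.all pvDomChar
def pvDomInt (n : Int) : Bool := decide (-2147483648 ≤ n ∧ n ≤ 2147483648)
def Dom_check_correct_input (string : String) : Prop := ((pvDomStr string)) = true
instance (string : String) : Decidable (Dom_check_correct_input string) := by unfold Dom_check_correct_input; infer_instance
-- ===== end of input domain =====

-- B replaces A's fused per-character loop with counter by set algebra on the DISTINCT
-- characters of the string: subset of (letters | symbols) and non-disjointness with letters.


-- ===== PORT A =====
-- the set("ABCDFGHJKLMPRTUVWXYZ~&|>() ")
def ccAllowed : PySem.Set Char := PySem.Set.ofList "ABCDFGHJKLMPRTUVWXYZ~&|>() ".toList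

-- A's loop: early return on a disallowed char, count letters, then test alpha_count == 0
def ccLoopA : List Char → Nat → Bool
  | [], alpha_count => if alpha_count == 0 then false else true
  | c :: rest, alpha_count =>
    if ¬ ccAllowed.contains c then false
    else if PySem.Chars.isalpha c then ccLoopA rest (alpha_count + 1)
    else ccLoopA rest alpha_count

def check_correct_input (string : String) : Bool :=
  ccLoopA string.toList 0

-- ===== PORT B =====
def check_correct_input_alt (string : String) : Bool :=
  let letters : PySem.Set Char := PySem.Set.ofList "ABCDFGHJKLMPRTUVWXYZ".toList
  let symbols : PySem.Set Char := PySem.Set.ofList "~&|>() ".toList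
  let chars : PySem.Set Char := PySem.Set.ofList string.toList
  PySem.Set.issubset chars (PySem.Set.union letters symbols)
    && !(PySem.Set.isdisjoint chars letters)

-- ===== PRECONDITION & SPEC =====
def Spec_check_correct_input (string : String) (out : Bool) : Prop := out = check_correct_input_alt string
instance (string : String) (out : Bool) : Decidable (Spec_check_correct_input string out) := by unfold Spec_check_correct_input; infer_instance

-- ===== CLAIM =====
def Claim_equal_check_correct_input : Prop := ∀ (string : String), Dom_check_correct_input string → Spec_check_correct_input string (check_correct_input string)

-- ===== LEMMAS AND PROOFS =====
-- loop invariant: A's loop equals "all allowed && (count already positive || some letter remains)"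
theorem ccLoopA_eq (cs : List Char) : ∀ (k : Nat),
    ccLoopA cs k
      = (cs.all (fun c => ccAllowed.contains c)
          && (!(k == 0) || cs.any (fun c => PySem.Chars.isalpha c))) := by
  induction cs with
  | nil => intro k; simp [ccLoopA]; cases k <;> simp
  | cons c rest ih =>
    intro k
    by_cases hmem : c ∈ ccAllowed
    · by_cases halpha : PySem.Chars.isalpha c
      · simp [ccLoopA, hmem, halpha, ih]
      · simp [ccLoopA, hmem, halpha, ih]
    · simp [ccLoopA, hmem]

-- an allowed char is alphabetic iff it is one of the letters
theorem ccAlpha_iff (c : Char) (h : c ∈ ccAllowed) :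
    PySem.Chars.isalpha c = "ABCDFGHJKLMPRTUVWXYZ".toList.contains c := by
  have hall := List.all_eq_true.mp
    (by decide : ccAllowed.all
      (fun c => PySem.Chars.isalpha c == "ABCDFGHJKLMPRTUVWXYZ".toList.contains c) = true) c h
  simpa using hall

-- ===== VERDICT =====
theorem check_correct_input_spec : Claim_equal_check_correct_input := by
  intro s _
  unfold Spec_check_correct_input check_correct_input check_correct_input_alt
  rw [ccLoopA_eq]
  have hu : PySem.Set.union (PySem.Set.ofList "ABCDFGHJKLMPRTUVWXYZ".toList)
      (PySem.Set.ofList "~&|>() ".toList) = ccAllowed := by decide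
  simp only [hu]
  by_cases hall : ∀ c ∈ s.toList, c ∈ ccAllowed
  · have h1 : s.toList.all (fun c => ccAllowed.contains c) = true := by
      simp [List.all_eq_true]; exact fun c hc => by simpa using hall c hc
    have h2 : PySem.Set.issubset (PySem.Set.ofList s.toList) ccAllowed = true := by
      rw [PySem.Set.issubset_iff]; intro x hx
      exact hall x (by simpa using hx)
    rw [h1, h2]
    simp only [Bool.true_and]
    have : (s.toList.any fun c => PySem.Chars.isalpha c)
        = !(PySem.Set.isdisjoint (PySem.Set.ofList s.toList)
              (PySem.Set.ofList "ABCDFGHJKLMPRTUVWXYZ".toList)) := by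
      rcases hd : PySem.Set.isdisjoint (PySem.Set.ofList s.toList)
          (PySem.Set.ofList "ABCDFGHJKLMPRTUVWXYZ".toList) with _ | _
      · -- not disjoint: some letter occurs, so any isalpha is true
        simp only [Bool.not_false]
        have hex : ∃ x ∈ s.toList, x ∈ "ABCDFGHJKLMPRTUVWXYZ".toList := by
          by_contra hno
          push Not at hno
          have hdt : PySem.Set.isdisjoint (PySem.Set.ofList s.toList)
              (PySem.Set.ofList "ABCDFGHJKLMPRTUVWXYZ".toList) = true := by
            rw [PySem.Set.isdisjoint_iff]
            intro x hx hx'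
            exact hno x (by simpa using hx) (by simpa using hx')
          rw [hd] at hdt
          exact absurd hdt (by decide)
        obtain ⟨x, hx, hx'⟩ := hex
        simp only [List.any_eq_true]
        refine ⟨x, hx, ?_⟩
        rw [ccAlpha_iff x (hall x hx)]
        simpa using hx'
      · -- disjoint: no letter occurs, so no allowed char is alphabetic
        simp only [Bool.not_true]
        rw [PySem.Set.isdisjoint_iff] at hd
        simp only [List.any_eq_false]
        intro x hx habs
        rw [ccAlpha_iff x (hall x hx)] at habs
        exact hd x (by simpa using hx) (by simpa using habs)
    rw [this]; simp
  · push Not at hall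
    obtain ⟨c, hc, hcn⟩ := hall
    have h1 : s.toList.all (fun c => ccAllowed.contains c) = false := by
      simp only [List.all_eq_false]
      exact ⟨c, hc, by simpa using hcn⟩
    have h2 : PySem.Set.issubset (PySem.Set.ofList s.toList) ccAllowed = false := by
      rcases h : PySem.Set.issubset (PySem.Set.ofList s.toList) ccAllowed with _|_
      · rfl
      · rw [PySem.Set.issubset_iff] at h
        exact absurd (h c (by simpa using hc)) hcn
    rw [h1, h2]; simp
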